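-- pv_equiv track=rewrite | github.com/ParkinsonLab/PopNet | GriggsLoader.py | identifyDrift
-- ===== SOURCE A (Python) =====
-- def identifyDrift(line):
--     MININUM_SHARED = 3
--     snps = line[3:]
--     drifts = []
--     indices = []
--     for element in set(snps):
--         if snps.count(element) < MININUM_SHARED:
--             drifts.append(element)
--     for index, element in enumerate(line):
--         if element in drifts:
--             indices.append(index)
--     return indices
-- ===== SOURCE B (Python) =====
-- def identifyDrift(line):
--     MININUM_SHARED = 3
--     # inverted index: value -> all its positions in line (one pass)
--     positions = {}
--     for idx, el in enumerate(line):
--         positions.setdefault(el, []).append(idx)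
--     # occurrence counts over the SNP region only
--     counts = {}
--     for el in line[3:]:
--         counts[el] = counts.get(el, 0) + 1
--     # gather indices value-by-value, then restore ascending order
--     result = []
--     for value, c in counts.items():
--         if c < MININUM_SHARED:
--             result.extend(positions[value])
--     return sorted(result)
-- ===== Notes on version B (the rewrite author's own statement) =====
-- stated objective: faster
-- what changed: B builds an inverted index (value -> list of its positions) in one pass and a count dict over line[3:], gathers indices value-by-value from the index for values with count < 3, and sorts the result, instead of A's per-distinct-value snps.count rescans and per-index 'element in drifts' list scans.
import Mathlib
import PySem

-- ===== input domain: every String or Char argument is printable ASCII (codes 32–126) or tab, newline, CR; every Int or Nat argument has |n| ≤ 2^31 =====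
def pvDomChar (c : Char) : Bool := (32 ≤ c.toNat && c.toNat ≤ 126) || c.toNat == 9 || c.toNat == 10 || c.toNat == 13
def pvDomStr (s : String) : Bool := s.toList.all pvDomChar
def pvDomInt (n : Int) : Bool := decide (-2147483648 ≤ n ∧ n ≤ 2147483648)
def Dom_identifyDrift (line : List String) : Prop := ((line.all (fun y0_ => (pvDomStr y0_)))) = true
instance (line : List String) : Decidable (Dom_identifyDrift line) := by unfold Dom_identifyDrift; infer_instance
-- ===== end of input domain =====

-- B replaces A's scan-per-index membership test by an inverted index (value -> its positions),
-- gathers the positions of rarely-shared values value-by-value and sorts; same return value, different traversal.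
-- ===== PORT A =====
def identifyDrift (line : List String) : List Int :=
  let snps := PySem.List.slice line (some 3) none
  let drifts := (PySem.Set.ofList snps).foldl
      (fun acc el => if PySem.List.count snps el < 3 then acc ++ [el] else acc) ([] : List String)
  (PySem.List.enumerate line 0).foldl
      (fun acc p => if drifts.contains p.2 then acc ++ [p.1] else acc) ([] : List Int)

-- ===== PORT B =====
def identifyDrift_alt (line : List String) : List Int :=
  let positions := (PySem.List.enumerate line 0).foldl
      (fun d p => d.modify p.2 ([] : List Int) (· ++ [p.1]))
      (PySem.Dict.empty : PySem.Dict String (List Int))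
  let counts := (PySem.List.slice line (some 3) none).foldl
      (fun d el => d.modify el 0 (· + 1)) (PySem.Dict.empty : PySem.Dict String Int)
  let result := counts.items.foldl
      (fun acc p => if p.2 < 3 then acc ++ positions.getD p.1 [] else acc) ([] : List Int)
  PySem.List.sorted result (fun x => x) false

-- ===== PRECONDITION & SPEC =====
def Spec_identifyDrift (line : List String) (out : List Int) : Prop := out = identifyDrift_alt line
instance (line : List String) (out : List Int) : Decidable (Spec_identifyDrift line out) := by unfold Spec_identifyDrift; infer_instance

-- ===== CLAIM (what is proved, stated in full; the proofs are below) =====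
def Claim_equal_identifyDrift : Prop := ∀ (line : List String), Dom_identifyDrift line → Spec_identifyDrift line (identifyDrift line)

-- ===== LEMMAS AND PROOFS =====

-- filtering by membership in a duplicate-free key list is (up to permutation) the
-- concatenation of the per-key filters
theorem filter_mem_perm_flatMap (ks : List String) (l : List (Int × String))
    (hnd : ks.Nodup) :
    (l.filter (fun p => decide (p.2 ∈ ks))).Perm
      (ks.flatMap (fun v => l.filter (fun p => p.2 == v))) := by
  induction ks with
  | nil => simp
  | cons v ks ih =>
    have hv : v ∉ ks := (List.nodup_cons.mp hnd).1
    have ihv := ih (List.nodup_cons.mp hnd).2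
    have hsplit := List.filter_append_perm (fun p : Int × String => p.2 == v)
        (l.filter (fun p => decide (p.2 ∈ v :: ks)))
    have h1 : (l.filter (fun p => decide (p.2 ∈ v :: ks))).filter (fun p => p.2 == v)
        = l.filter (fun p => p.2 == v) := by
      rw [List.filter_filter]
      apply List.filter_congr
      intro p _
      by_cases h : p.2 = v <;> simp [h]
    have h2 : (l.filter (fun p => decide (p.2 ∈ v :: ks))).filter (fun p => !(p.2 == v))
        = l.filter (fun p => decide (p.2 ∈ ks)) := by
      rw [List.filter_filter]
      apply List.filter_congr
      intro p _
      by_cases h : p.2 = v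
      · subst h; simp [hv]
      · simp [h]
    rw [h1, h2] at hsplit
    refine hsplit.symm.trans ((ihv.append_left _).trans (List.Perm.of_eq ?_))
    simp

-- the inverted index built by B's first loop: positions.getD v is the ascending list
-- of indices of v in the enumerated line
theorem posGetD (l : List (Int × String)) (v : String) :
    ((l.foldl (fun d p => d.modify p.2 ([] : List Int) (· ++ [p.1]))
        (PySem.Dict.empty : PySem.Dict String (List Int))).getD v [])
      = (l.filter (fun p => p.2 == v)).map (·.1) := by
  have h := PySem.Dict.getD_foldl_modify_append
      (l := l.map (fun p => (p.2, p.1)))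
      (d := (PySem.Dict.empty : PySem.Dict String (List Int))) (c := v)
  rw [List.foldl_map] at h
  simpa [List.filter_map, List.map_map, Function.comp] using h

-- ===== VERDICT (by name: the statement is the Claim_ definition above) =====
theorem identifyDrift_spec : Claim_equal_identifyDrift := by
  intro line _
  unfold Spec_identifyDrift identifyDrift identifyDrift_alt
  dsimp only
  rw [← PySem.Dict.counter_eq_foldl]
  rw [PySem.List.foldl_append_ite_eq_filter, PySem.List.foldl_append_if,
    PySem.List.foldl_ite_eq_foldl_filter, PySem.List.foldl_append_eq_flatMap]
  simp only [PySem.Dict.items_counter, List.nil_append, posGetD]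
  set snps := PySem.List.slice line (some 3) none with hsnps
  set enum := PySem.List.enumerate line 0 with henum
  -- the drift-value list is the same on both sides
  have hks : ((PySem.Set.ofList snps).map (fun k => (k, (List.count k snps : Int)))).filter
        (fun p => decide (p.2 < 3))
      = ((PySem.Set.ofList snps).filter (fun el => decide (PySem.List.count snps el < 3))).map
        (fun k => (k, (List.count k snps : Int))) := by
    rw [List.filter_map]
    congr 1
    apply List.filter_congr
    intro v _
    simp only [Function.comp, PySem.List.count_eq]
    by_cases h : List.count v snps < 3
    · simp [h, show ((List.count v snps : Int) < 3) by exact_mod_cast h]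
    · simp [h, show ¬((List.count v snps : Int) < 3) by exact_mod_cast h]
  rw [hks, List.flatMap_map]
  dsimp only
  set ks := (PySem.Set.ofList snps).filter (fun el => decide (PySem.List.count snps el < 3)) with hksdef
  have hnd : ks.Nodup := (PySem.Set.nodup_ofList snps).filter _
  -- A's output, rewritten to membership in ks
  have hA : enum.filter (fun p => ks.contains p.2) = enum.filter (fun p => decide (p.2 ∈ ks)) := by
    apply List.filter_congr
    intro p _
    by_cases h : p.2 ∈ ks <;> simp [h]
  rw [hA]
  -- permutation between A's filtered list and B's gathered blocks
  have hperm : ((enum.filter (fun p => decide (p.2 ∈ ks))).map (·.1)).Perm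
      (ks.flatMap (fun v => (enum.filter (fun p => p.2 == v)).map (·.1))) := by
    have h := (filter_mem_perm_flatMap ks enum hnd).map (·.1)
    simpa [List.map_flatMap, Function.comp] using h
  -- A's output is strictly increasing
  have hpair : ((enum.filter (fun p => decide (p.2 ∈ ks))).map (·.1)).Pairwise (· < ·) := by
    apply List.Pairwise.map
    · exact fun a b h => h
    · exact (PySem.List.pairwise_lt_enumerate line 0).filter _
  exact (PySem.List.sorted_eq_of_perm_of_pairwise_lt _ _ _ hperm hpair).symm
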